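-- pv_equiv track=rewrite | github.com/milana-todorovic/OISISI_Python | searchengine/query/simple_query.py | parse
-- ===== SOURCE A (Python) =====
-- class SimpleQueryError(Exception):
--     """Klasa koja predstavlja gresku pri parsiranju osnovnih upita."""
--
--     def __init__(self, message):
--         self.message = message
--
-- def parse(query):
--     """Parsiraj osnovni upit i vrati listu reci i operator.
--
--     U slucaju greske podize SimpleQueryError sa odgovarajucom porukom.
--     Argumenti:
--         query - upit.
--     """
--
--     reci = query.lower().strip().split()
--
--     if not reci:
--         raise SimpleQueryError("Upit mora sadržati bar jednu reč!")
--
--     andcount = reci.count("and")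
--     orcount = reci.count("or")
--     notcount = reci.count("not")
--
--     if (andcount + orcount + notcount) > 1:
--         raise SimpleQueryError("Upit može sadržati maksimalno jedan logički operator!")
--
--     if andcount == 1:
--         if len(reci) != 3 or reci[1] != "and":
--             raise SimpleQueryError("Operator and može biti samo između dve reči!")
--         else:
--             return [rec for rec in reci if rec != "and"], "and"
--     elif notcount == 1:
--         if len(reci) != 3 or reci[1] != "not":
--             raise SimpleQueryError("Operator not može biti samo između dve reči!")
--         else:
--             return [rec for rec in reci if rec != "not"], "not"
--     elif orcount == 1:
--         if len(reci) != 3 or reci[1] != "or":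
--             raise SimpleQueryError("Operator or može biti samo između dve reči!")
--         else:
--             return [rec for rec in reci if rec != "or"], "or"
--     else:
--         return reci, "or"
-- ===== SOURCE B (Python) =====
-- class SimpleQueryError(Exception):
--     def __init__(self, message):
--         self.message = message
--
--
-- def parse(query):
--     reci = query.lower().strip().split()
--
--     if not reci:
--         raise SimpleQueryError("Upit mora sadržati bar jednu reč!")
--
--     # one pass: record (position, word) of every operator occurrence
--     found = [(i, w) for i, w in enumerate(reci) if w in ("and", "or", "not")]
--
--     if len(found) > 1:
--         raise SimpleQueryError("Upit može sadržati maksimalno jedan logički operator!")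
--
--     if not found:
--         return reci, "or"
--
--     i, op = found[0]
--     if len(reci) != 3 or i != 1:
--         raise SimpleQueryError(f"Operator {op} može biti samo između dve reči!")
--     return [reci[0], reci[2]], op
-- ===== Notes on version B (the rewrite author's own statement) =====
-- stated objective: alternative
-- what changed: Instead of three per-operator count/validate/filter blocks, B makes a single enumerate pass recording the positions of all operator occurrences, validates by the recorded position (index 1 of a 3-word list), and rebuilds the result directly from reci[0] and reci[2] rather than filtering the operator out.
-- outside the precondition, e.g. on parse(''): A raises SimpleQueryError, B raises SimpleQueryError; on parse('x and'): A raises SimpleQueryError, B raises SimpleQueryError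
import Mathlib
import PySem

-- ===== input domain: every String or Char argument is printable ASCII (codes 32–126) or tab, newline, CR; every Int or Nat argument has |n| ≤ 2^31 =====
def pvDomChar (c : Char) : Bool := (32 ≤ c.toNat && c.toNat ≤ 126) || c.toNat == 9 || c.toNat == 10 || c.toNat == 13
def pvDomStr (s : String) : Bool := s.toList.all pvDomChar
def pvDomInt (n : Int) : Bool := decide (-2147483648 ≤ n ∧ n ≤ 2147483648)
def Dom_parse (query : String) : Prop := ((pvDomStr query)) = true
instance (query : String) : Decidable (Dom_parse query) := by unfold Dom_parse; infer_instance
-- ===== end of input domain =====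

-- B replaces A's three per-operator count/validate/filter blocks with one enumerate pass
-- recording operator positions; validation is by position and the result is rebuilt from
-- reci[0]/reci[2]. Equivalence of RETURN values is proved on Pre_ (where A returns).

-- ===== PORT A =====
-- A's body after the split; raise sites return ([], "") (excluded by Pre_parse).
def parseCoreA (reci : List String) : List String × String :=
  if reci = [] then ([], "")
  else
    let andcount := PySem.List.count reci "and"
    let orcount := PySem.List.count reci "or"
    let notcount := PySem.List.count reci "not"
    if andcount + orcount + notcount > 1 then ([], "")
    else if andcount = 1 then
      if reci.length ≠ 3 ∨ PySem.List.pyGet? reci 1 ≠ some "and" then ([], "")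
      else (reci.filter (· != "and"), "and")
    else if notcount = 1 then
      if reci.length ≠ 3 ∨ PySem.List.pyGet? reci 1 ≠ some "not" then ([], "")
      else (reci.filter (· != "not"), "not")
    else if orcount = 1 then
      if reci.length ≠ 3 ∨ PySem.List.pyGet? reci 1 ≠ some "or" then ([], "")
      else (reci.filter (· != "or"), "or")
    else (reci, "or")

def parse (query : String) : List String × String :=
  parseCoreA (PySem.Str.split₀ (PySem.Str.strip (PySem.Str.lower query)))

-- ===== PORT B =====
-- B's body after the split; raise sites return ([], "") (excluded by Pre_parse).
def parseCoreB (reci : List String) : List String × String :=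
  if reci = [] then ([], "")
  else
    let found := (PySem.List.enumerate reci).filter
      (fun p => (["and", "or", "not"] : List String).contains p.2)
    if found.length > 1 then ([], "")
    else
      match found with
      | [] => (reci, "or")
      | (i, op) :: _ =>
        if reci.length ≠ 3 ∨ i ≠ 1 then ([], "")
        -- reci.length = 3 in this branch, so both pyGet? are some; getD "" is unreachable
        else ([(PySem.List.pyGet? reci 0).getD "", (PySem.List.pyGet? reci 2).getD ""], op)

def parse_alt (query : String) : List String × String :=
  parseCoreB (PySem.Str.split₀ (PySem.Str.strip (PySem.Str.lower query)))

-- ===== PRECONDITION & SPEC =====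
-- Pre_ excludes exactly the inputs on which A raises SimpleQueryError: an empty word list,
-- more than one logical operator, or an operator not in the middle of exactly three words.
def Pre_parse (query : String) : Prop :=
  let ws := PySem.Str.split₀ (PySem.Str.strip (PySem.Str.lower query))
  ws ≠ [] ∧
  PySem.List.count ws "and" + PySem.List.count ws "or" + PySem.List.count ws "not" ≤ 1 ∧
  (∀ op ∈ (["and", "not", "or"] : List String),
    PySem.List.count ws op = 1 → ws.length = 3 ∧ PySem.List.pyGet? ws 1 = some op)

instance (query : String) : Decidable (Pre_parse query) := by unfold Pre_parse; infer_instance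

def pvWitness_parse : String := "foo AND bar"

def Spec_parse (query : String) (out : List String × String) : Prop := out = parse_alt query
instance (query : String) (out : List String × String) : Decidable (Spec_parse query out) := by unfold Spec_parse; infer_instance

-- ===== CLAIM =====
def Claim_equal_parse : Prop := ∀ (query : String), Dom_parse query → Pre_parse query → Spec_parse query (parse query)

-- ===== LEMMAS AND PROOFS =====

theorem not_mem_of_count_zero {ws : List String} {op : String}
    (h : PySem.List.count ws op = 0) : op ∉ ws := by
  rw [PySem.List.count_eq] at h
  exact List.count_eq_zero.mp h

-- In the no-operator case B's filtered enumeration is empty.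
theorem found_nil {ws : List String}
    (ha : "and" ∉ ws) (ho : "or" ∉ ws) (hn : "not" ∉ ws) :
    List.filter (fun p => decide (p.2 = "and") || (decide (p.2 = "or") || decide (p.2 = "not")))
      (PySem.List.enumerate ws) = [] := by
  rw [List.filter_eq_nil_iff]
  intro p hp
  rw [PySem.List.mem_enumerate_iff] at hp
  obtain ⟨k, hk, rfl⟩ := hp
  have hmem : ws[k] ∈ ws := List.getElem_mem hk
  simp only [Bool.or_eq_true, decide_eq_true_eq]
  rintro (h | h | h) <;> simp_all

-- A three-element list with the operator in the middle and no other operator occurrence.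
theorem core_eq_single (a c op : String)
    (hop : op ∈ (["and", "not", "or"] : List String))
    (ha : a ∉ (["and", "not", "or"] : List String))
    (hc : c ∉ (["and", "not", "or"] : List String)) :
    parseCoreA [a, op, c] = parseCoreB [a, op, c] := by
  simp only [List.mem_cons, List.not_mem_nil, or_false, not_or] at ha hc
  obtain ⟨ha1, ha2, ha3⟩ := ha
  obtain ⟨hc1, hc2, hc3⟩ := hc
  fin_cases hop <;>
    simp [parseCoreA, parseCoreB, PySem.List.count_eq,
      PySem.List.enumerate, PySem.List.pyGet?, PySem.List.pyIdx?,
      ha1, ha2, ha3, hc1, hc2, hc3]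

theorem core_eq (ws : List String) (hne : ws ≠ [])
    (hle : PySem.List.count ws "and" + PySem.List.count ws "or" + PySem.List.count ws "not" ≤ 1)
    (hsh : ∀ op ∈ (["and", "not", "or"] : List String),
      PySem.List.count ws op = 1 → ws.length = 3 ∧ PySem.List.pyGet? ws 1 = some op) :
    parseCoreA ws = parseCoreB ws := by
  by_cases h0 : PySem.List.count ws "and" = 0 ∧ PySem.List.count ws "or" = 0 ∧
      PySem.List.count ws "not" = 0
  · obtain ⟨ha, ho, hn⟩ := h0
    have hfn := found_nil (not_mem_of_count_zero ha) (not_mem_of_count_zero ho)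
      (not_mem_of_count_zero hn)
    rw [PySem.List.count_eq] at ha ho hn
    simp [parseCoreA, parseCoreB, hne, ha, ho, hn, hfn]
  · -- exactly one operator occurrence; name it op
    have : ∃ op ∈ (["and", "not", "or"] : List String), PySem.List.count ws op = 1 ∧
        ∀ op' ∈ (["and", "not", "or"] : List String), op' ≠ op → PySem.List.count ws op' = 0 := by
      by_cases h1 : PySem.List.count ws "and" = 1
      · exact ⟨"and", by simp, h1, by
            intro op' h' hne'; fin_cases h'
            · simp_all
            · omega
            · omega⟩
      · by_cases h2 : PySem.List.count ws "not" = 1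
        · exact ⟨"not", by simp, h2, by
            intro op' h' hne'; fin_cases h'
            · omega
            · simp_all
            · omega⟩
        · refine ⟨"or", by simp, by omega, by
            intro op' h' hne'; fin_cases h'
            · omega
            · omega
            · simp_all⟩
    obtain ⟨op, hopmem, hop1, hrest⟩ := this
    obtain ⟨hlen, hget⟩ := hsh op hopmem hop1
    obtain ⟨a, b, c, rfl⟩ := List.length_eq_three.mp hlen
    have hb : b = op := by
      simpa [PySem.List.pyGet?, PySem.List.pyIdx?] using hget
    subst hb
    have hcnt : List.count b [a, b, c] = 1 := by rw [← PySem.List.count_eq]; exact hop1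
    have hab : a ≠ b ∧ c ≠ b := by
      constructor <;> intro h <;> subst h <;>
        · simp only [List.count_cons, List.count_nil, beq_iff_eq] at hcnt
          split_ifs at hcnt <;> omega
    have hrest' : ∀ op' ∈ (["and", "not", "or"] : List String), op' ≠ b → a ≠ op' ∧ c ≠ op' := by
      intro op' h' hne'
      have h0 := not_mem_of_count_zero (hrest op' h' hne')
      simp only [List.mem_cons, List.not_mem_nil, or_false, not_or] at h0
      exact ⟨fun h => h0.1 h.symm, fun h => h0.2.2 h.symm⟩
    have hA : a ∉ (["and", "not", "or"] : List String) := by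
      intro hmem
      by_cases h1 : a = b
      · exact hab.1 h1
      · exact (hrest' a hmem h1).1 rfl
    have hC : c ∉ (["and", "not", "or"] : List String) := by
      intro hmem
      by_cases h1 : c = b
      · exact hab.2 h1
      · exact (hrest' c hmem h1).2 rfl
    exact core_eq_single a c b hopmem hA hC

-- ===== VERDICT =====
theorem parse_spec : Claim_equal_parse := by
  intro query _ hpre
  obtain ⟨hne, hle, hsh⟩ := hpre
  exact core_eq _ hne hle hsh
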